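/- GENERATED by tools/from_farm_form.py from farm/worked/exp/Proof.lean (a worked proof of the farm's unit `exp`,
   accepted by the verdict) — do not edit. -/
import Asan.CheckWalk
import ProgX.Base.Spec.Units.exp

open X86 X86.User Asan ProgX.Base

set_option maxRecDepth 4000
set_option maxHeartbeats 4000000

namespace ProgX.Base.Spec.Proved.exp
open ProgX.Base.Spec.exp (Statement)

/-- **The shadow clause at the entry of a callee of `exp`** (`two_to`, `floor`, `ldexp`: their whole precondition). At each of
the three call sites the stack pointer is `rsp − 16` (`sub rsp, 8` and the pushed return address), so the callee's clean stack
ends at `rsp − 8`, below ours (`ShadowInv.lower`); no store of `exp` went to the shadow (`hun`). -/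
theorem callee_pre_w {others : List Obj} {frames : List (Nat × FrameLayout)} {u s : State}
    (hpre : ShadowPre others frames u) (hun : ShadowUntouched u.mem s.mem)
    (hrsp : s.reg .rsp = u.reg .rsp - 16) (hroom : 0x700000 + 40 ≤ (u.reg .rsp).toNat) :
    ShadowPre others frames s := by
  have hsp := hpre.rsp
  have htop : (s.reg .rsp).toNat + 8 = (u.reg .rsp).toNat - 8 := by
    rw [hrsp]
    u_omega
  refine ⟨?_, hpre.offText⟩
  rw [htop]
  exact (hpre.inv.untouched hun).lower (by omega) (by omega) (by omega)

end ProgX.Base.Spec.Proved.exp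

/-- `exp(x)` satisfies its contract: four `ret` paths selected by float compares (both arms of each are walked: the values are
opaque), three calls of functions with a contract (`two_to`, `floor`, `ldexp`: the walk stops after each return and the facts of
the returned state are restated), 72 SSE steps. The only stores are the spill of `x` at `[rsp − 8]` and the return addresses of
the calls at `[rsp − 16]`; everything a callee writes lies in the stack window `[rsp − 40, rsp)` of the contract. -/
theorem ProgX.Base.Spec.Proved.exp_ok : ProgX.Base.Spec.exp.Statement := by
  intro Lay hLay μ hμ u₀ hcode h_two_to h_floor h_ldexp others frames u ret he hpre
  v_entry he
  have hsp := hpre.rsp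
  -- the callees' contracts, with OUR ghosts (the walker reads hypotheses that are literally `Calls …`)
  have hc_two_to := h_two_to others frames
  have hc_floor := h_floor others frames
  have hc_ldexp := h_ldexp others frames
  -- 0x1025c0 (libm.c:64): from the entry to the two early `ret`s and to the calls of `two_to` (0x1025ea) and `floor` (0x102623)
  u_walk hcode [hμ.vendor] span [ProgX.Base.L.textLo, ProgX.Base.L.textHi] side (v_side)
  · -- call_inv of `floor` (0x102623, libm.c:78): DF and the MXCSR masks at its entry
    v_inv
  · -- the precondition of `floor`
    have hun : ShadowUntouched u.mem s_102623.mem := by v_untouched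
    exact ProgX.Base.Spec.Proved.exp.callee_pre_w hpre hun w_rsp he_room
  · -- call_inv of `two_to` (0x1025ea, libm.c:73)
    v_inv
  · -- the precondition of `two_to`
    have hun : ShadowUntouched u.mem s_1025ea.mem := by v_untouched
    exact ProgX.Base.Spec.Proved.exp.callee_pre_w hpre hun w_rsp he_room
  · -- 0x10275e (libm.c:76): `x < -745.0`, `return 0.0`
    refine ReachVia.done ?_
    v_returned
    show ShadowUntouched u.mem s_102756.mem
    v_untouched
  · -- L.exp.cut2 = 0x102628 (libm.c:78): after the return of `floor`. What the rest of the walk needs of the returned state: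
    -- the code span, DF and the MXCSR masks (the convention's invariant), the memory (the callee's footprint lies in our
    -- stack window), the slot of our return address
    simp only [X86.User.Spec.footprint, vspec, w_rsp_102623] at w_same
    have w_eq := ProgX.Base.conv_code_eqOn w_code
    have hsse : SseOK s_102623r := ProgX.Base.sseOK_of_abiInv w_inv
    have hdf : s_102623r.flags .df = false := (show abiInv _ from w_inv).1
    have hmx : s_102623r.mxcsr &&& 0x1F80 = 0x1F80 := (show abiInv _ from w_inv).2
    have hsame : Mem.SameExcept [⟨(u.reg .rsp).toNat - 40, (u.reg .rsp).toNat⟩] u.mem s_102623r.mem := by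
      u_same
    clear w_same w_mem_102623 w_post w_code w_inv
    have hs0 : UInt64.ofNat (s_102623r.mem.readLE (u.reg .rsp) 8) = ret := by
      u_frame he_retAddr
    have hun : ShadowUntouched u.mem s_102623r.mem := by v_untouched
    -- libm.c:79–94: `n = (int) k` (any value), the polynomial, to the call of `ldexp` (0x10274d)
    u_walk hcode [hμ.vendor] span [ProgX.Base.L.textLo, ProgX.Base.L.textHi] side (v_side)
    · -- call_inv of `ldexp` (0x10274d, libm.c:94)
      v_inv
    · -- the precondition of `ldexp` (total in `n`: nothing about edi)
      have hun' : ShadowUntouched u.mem s_10274d.mem := by v_untouched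
      exact ProgX.Base.Spec.Proved.exp.callee_pre_w hpre hun' w_rsp he_room
    · -- L.exp.cut3 = 0x102752 (libm.c:95): after the return of `ldexp`; `add rsp, 8 ; ret`
      simp only [X86.User.Spec.footprint, vspec, w_rsp_10274d] at w_same
      have w_eq := ProgX.Base.conv_code_eqOn w_code
      have hdf' : s_10274dr.flags .df = false := (show abiInv _ from w_inv).1
      have hmx' : s_10274dr.mxcsr &&& 0x1F80 = 0x1F80 := (show abiInv _ from w_inv).2
      have hsame' : Mem.SameExcept [⟨(u.reg .rsp).toNat - 40, (u.reg .rsp).toNat⟩] u.mem s_10274dr.mem := by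
        u_same
      clear w_same w_mem_10274d w_post hsame hs0 hun
      have hs0' : UInt64.ofNat (s_10274dr.mem.readLE (u.reg .rsp) 8) = ret := by
        u_frame he_retAddr
      u_walk hcode [hμ.vendor] span [ProgX.Base.L.textLo, ProgX.Base.L.textHi] side (v_side)
      refine ReachVia.done ?_
      v_returned
      show ShadowUntouched u.mem s_102756.mem
      v_untouched
  · -- 0x102757 (libm.c:71): `x != x`, `return x`
    refine ReachVia.done ?_
    v_returned
    show ShadowUntouched u.mem s_102756.mem
    v_untouched
  · -- L.exp.cut1 = 0x1025ef (libm.c:73): after the return of `two_to`; `addsd xmm0, xmm0`, then `add rsp, 8 ; ret`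
    simp only [X86.User.Spec.footprint, vspec, w_rsp_1025ea] at w_same
    have w_eq := ProgX.Base.conv_code_eqOn w_code
    have hsse : SseOK s_1025ear := ProgX.Base.sseOK_of_abiInv w_inv
    have hdf : s_1025ear.flags .df = false := (show abiInv _ from w_inv).1
    have hmx : s_1025ear.mxcsr &&& 0x1F80 = 0x1F80 := (show abiInv _ from w_inv).2
    have hsame : Mem.SameExcept [⟨(u.reg .rsp).toNat - 40, (u.reg .rsp).toNat⟩] u.mem s_1025ear.mem := by
      u_same
    clear w_same w_mem_1025ea w_post
    have hs0 : UInt64.ofNat (s_1025ear.mem.readLE (u.reg .rsp) 8) = ret := by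
      u_frame he_retAddr
    u_walk hcode [hμ.vendor] span [ProgX.Base.L.textLo, ProgX.Base.L.textHi] side (v_side)
    refine ReachVia.done ?_
    v_returned
    show ShadowUntouched u.mem s_102756.mem
    v_untouched
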